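-- pv_equiv track=rewrite | github.com/bulldra/blog-writer | app/obsidian.py | _group_blockquotes
-- ===== SOURCE A (Python) =====
-- from typing import Dict, Iterable, Iterator, List, Optional, Tuple, cast
--
-- def _group_blockquotes(lines: List[str]) -> List[Tuple[int, List[str]]]:
--     groups: List[Tuple[int, List[str]]] = []
--     buf: List[str] = []
--     start = 0
--     for i, ln in enumerate(lines):
--         if ln.lstrip().startswith(">"):
--             if not buf:
--                 start = i
--             buf.append(ln)
--         else:
--             if buf:
--                 groups.append((start, buf))
--                 buf = []
--     if buf:
--         groups.append((start, buf))
--     return groups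
-- ===== SOURCE B (Python) =====
-- def _group_blockquotes(lines):
--     groups = []
--     i, n = 0, len(lines)
--     while i < n:
--         if lines[i].lstrip().startswith(">"):
--             j = i + 1
--             while j < n and lines[j].lstrip().startswith(">"):
--                 j += 1
--             groups.append((i, lines[i:j]))
--             i = j
--         else:
--             i += 1
--     return groups
-- ===== Notes on version B (the rewrite author's own statement) =====
-- stated objective: simpler
-- what changed: Replaces A's buffer/start state machine (carried flags, deferred final flush) with a direct two-pointer run scan: on each blockquote line it advances a second index to the end of the run and emits (start, slice) immediately, so there is no buffer state or post-loop flush.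
import Mathlib
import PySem

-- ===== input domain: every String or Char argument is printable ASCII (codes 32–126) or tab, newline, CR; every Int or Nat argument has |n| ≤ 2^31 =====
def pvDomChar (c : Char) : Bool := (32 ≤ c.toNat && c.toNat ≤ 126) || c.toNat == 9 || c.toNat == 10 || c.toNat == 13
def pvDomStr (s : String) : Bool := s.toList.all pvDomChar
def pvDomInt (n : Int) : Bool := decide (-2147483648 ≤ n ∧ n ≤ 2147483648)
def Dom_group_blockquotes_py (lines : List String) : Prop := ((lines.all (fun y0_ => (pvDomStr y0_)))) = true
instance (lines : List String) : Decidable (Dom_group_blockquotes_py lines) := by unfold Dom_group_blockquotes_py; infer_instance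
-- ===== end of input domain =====

-- B replaces A's buffer/start state machine with a direct two-pointer run scan (simpler decomposition, same O(n) cost).

-- ===== PORT A =====
-- ln.lstrip().startswith(">")
def pvIsBq (s : String) : Bool := PySem.Str.startswith (PySem.Str.lstrip s) ">"

-- the 'for i, ln in enumerate(lines)' loop of A, state (groups, buf, start), index i carried
def pvAGo (groups : List (Int × List String)) (buf : List String) (start : Int) (i : Int) :
    List String → List (Int × List String) × List String × Int
  | [] => (groups, buf, start)
  | ln :: rest =>
    if pvIsBq ln then
      if buf.isEmpty then pvAGo groups (buf ++ [ln]) i (i + 1) rest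
      else pvAGo groups (buf ++ [ln]) start (i + 1) rest
    else
      if buf.isEmpty then pvAGo groups buf start (i + 1) rest
      else pvAGo (groups ++ [(start, buf)]) [] start (i + 1) rest

def group_blockquotes_py (lines : List String) : List (Int × List String) :=
  let st := pvAGo [] [] 0 0 lines
  if st.2.1.isEmpty then st.1 else st.1 ++ [(st.2.2, st.2.1)]

-- ===== PORT B =====
-- B's outer while loop; the inner 'while j < n and is_bq' scan is takeWhile, lines[i:j] the scanned run
def pvBGo (i : Int) : List String → List (Int × List String)
  | [] => []
  | ln :: rest =>
    if pvIsBq ln then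
      let run := ln :: rest.takeWhile pvIsBq
      (i, run) :: pvBGo (i + run.length) (rest.dropWhile pvIsBq)
    else
      pvBGo (i + 1) rest
termination_by l => l.length
decreasing_by
  · simp only [List.length_cons]
    exact Nat.lt_succ_of_le (List.length_dropWhile_le pvIsBq rest)
  · simp

def group_blockquotes_py_alt (lines : List String) : List (Int × List String) :=
  pvBGo 0 lines

-- ===== PRECONDITION & SPEC =====
def Spec_group_blockquotes_py (lines : List String) (out : List (Int × List String)) : Prop := out = group_blockquotes_py_alt lines
instance (lines : List String) (out : List (Int × List String)) : Decidable (Spec_group_blockquotes_py lines out) := by unfold Spec_group_blockquotes_py; infer_instance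

-- ===== CLAIM (what is proved, stated in full; the proofs are below) =====
def Claim_equal_group_blockquotes_py : Prop := ∀ (lines : List String), Dom_group_blockquotes_py lines → Spec_group_blockquotes_py lines (group_blockquotes_py lines)

-- ===== LEMMAS AND PROOFS =====

/-- flush step that finishes A's state -/
def pvFinish (st : List (Int × List String) × List String × Int) : List (Int × List String) :=
  if st.2.1.isEmpty then st.1 else st.1 ++ [(st.2.2, st.2.1)]

theorem pvBGo_nil (i : Int) : pvBGo i [] = [] := by rw [pvBGo]

theorem pvBGo_cons_pos (i : Int) (ln : String) (rest : List String) (h : pvIsBq ln = true) :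
    pvBGo i (ln :: rest) =
      (i, ln :: rest.takeWhile pvIsBq)
        :: pvBGo (i + ((ln :: rest.takeWhile pvIsBq).length : Int)) (rest.dropWhile pvIsBq) := by
  rw [pvBGo]; simp [h]

theorem pvBGo_cons_neg (i : Int) (ln : String) (rest : List String) (h : pvIsBq ln = false) :
    pvBGo i (ln :: rest) = pvBGo (i + 1) rest := by
  rw [pvBGo]; simp [h]

/-- Combined invariant for A's loop, proved by one induction on the remaining lines:
    (1) empty buffer: the flushed result is `groups ++ pvBGo i rest` (any start);
    (2) nonempty buffer: the open run is completed by `takeWhile` and B resumes after it. -/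
theorem pvAGo_inv (lines : List String) :
    (∀ groups start i, pvFinish (pvAGo groups [] start i lines) = groups ++ pvBGo i lines) ∧
    (∀ groups buf start i, buf ≠ [] →
      pvFinish (pvAGo groups buf start i lines) =
        groups ++ (start, buf ++ lines.takeWhile pvIsBq)
          :: pvBGo (i + ((lines.takeWhile pvIsBq).length : Int)) (lines.dropWhile pvIsBq)) := by
  induction lines with
  | nil =>
    constructor
    · intro groups start i; simp [pvAGo, pvFinish, pvBGo_nil]
    · intro groups buf start i hbuf
      simp [pvAGo, pvFinish, pvBGo_nil, hbuf]
  | cons ln rest ih =>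
    constructor
    · intro groups start i
      by_cases h : pvIsBq ln
      · have h2 := ih.2 groups [ln] i (i + 1) (by simp)
        simp only [pvAGo, h, if_true, List.isEmpty_nil, List.nil_append] at h2 ⊢
        rw [h2, pvBGo_cons_pos i ln rest h]
        have hidx : i + 1 + ((rest.takeWhile pvIsBq).length : Int)
            = i + (((ln :: rest.takeWhile pvIsBq).length : Int)) := by
          simp; omega
        rw [hidx]
        simp
      · have h1 := ih.1 groups start (i + 1)
        have hb : pvIsBq ln = false := by simpa using h
        simp only [pvAGo, hb, Bool.false_eq_true, if_false, List.isEmpty_nil, if_true] at h1 ⊢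
        rw [h1, pvBGo_cons_neg i ln rest hb]
    · intro groups buf start i hbuf
      have hbe : buf.isEmpty = false := by simpa using hbuf
      by_cases h : pvIsBq ln
      · have h2 := ih.2 groups (buf ++ [ln]) start (i + 1) (by simp)
        simp only [pvAGo, h, if_true, hbe, Bool.false_eq_true, if_false] at h2 ⊢
        rw [h2]
        have hidx : i + 1 + ((rest.takeWhile pvIsBq).length : Int)
            = i + (((ln :: rest).takeWhile pvIsBq).length : Int) := by
          simp [h]; omega
        rw [hidx]
        simp [h]
      · have hb : pvIsBq ln = false := by simpa using h
        have h1 := ih.1 (groups ++ [(start, buf)]) start (i + 1)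
        simp only [pvAGo, hb, Bool.false_eq_true, if_false, hbe] at h1 ⊢
        rw [h1, ← pvBGo_cons_neg i ln rest hb]
        simp [hb]

-- ===== VERDICT (by name: the statement is the Claim_ definition above) =====
theorem group_blockquotes_py_spec : Claim_equal_group_blockquotes_py := by
  intro lines _
  unfold Spec_group_blockquotes_py group_blockquotes_py group_blockquotes_py_alt
  have h := (pvAGo_inv lines).1 [] 0 0
  simpa [pvFinish] using h
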